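-- pv_equiv track=rewrite | github.com/KyleCie/navigation-program-Lycee-SaintExupery-Fameck | english/FindPathSystem.py | findStairs
-- ===== SOURCE A (Python) =====
-- def findStairs(end: int) -> str:
--     """
--     Find the perfect stairs for the path
--
--     end:    room = int
--
--     return: "A" or "B" or "C" or "D"
--     """
--
--     if end in [114, 115, 116, 238, 239, 360, 365]:
--         return "A"
--
--     if end in [i for i in range(117, 126, 1)] or end in [241, 242, 243, 244, 245, 246, 247, 248, 249, 251] or end in [362, 364, 366, 367, 368, 369, 371, 373, 375, 377]:
--         return "B"
--
--     if end in [i for i in range(126, 134, 1)] or end in [250, 252, 253, 254, 255, 256, 257, 259, 261] or end in [370, 372, 374, 376, 379, 381, 382, 383, 385, 387]: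
--         return "C"
--
--     if end in [134, 135, 136, 137, 258, 263, 378, 389]:
--         return "D"
--
--     return "unknown"
-- ===== SOURCE B (Python) =====
-- # B: the room sets compressed into a sorted table of disjoint intervals,
-- # classified by binary search (rightmost interval start <= end, then bound check).
-- _INTERVALS = [
--     (114, 116, "A"), (117, 125, "B"), (126, 133, "C"), (134, 137, "D"),
--     (238, 239, "A"), (241, 249, "B"), (250, 250, "C"), (251, 251, "B"),
--     (252, 257, "C"), (258, 258, "D"), (259, 259, "C"), (261, 261, "C"),
--     (263, 263, "D"), (360, 360, "A"), (362, 362, "B"), (364, 364, "B"),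
--     (365, 365, "A"), (366, 369, "B"), (370, 370, "C"), (371, 371, "B"),
--     (372, 372, "C"), (373, 373, "B"), (374, 374, "C"), (375, 375, "B"),
--     (376, 376, "C"), (377, 377, "B"), (378, 378, "D"), (379, 379, "C"),
--     (381, 383, "C"), (385, 385, "C"), (387, 387, "C"), (389, 389, "D"),
-- ]
--
--
-- def findStairs(end: int) -> str:
--     lo, hi = 0, len(_INTERVALS)
--     while lo < hi:
--         mid = (lo + hi) // 2
--         if _INTERVALS[mid][0] <= end:
--             lo = mid + 1
--         else:
--             hi = mid
--     if lo == 0: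
--         return "unknown"
--     _, upper, letter = _INTERVALS[lo - 1]
--     return letter if end <= upper else "unknown"
-- ===== Notes on version B (the rewrite author's own statement) =====
-- stated objective: alternative
-- what changed: Replaced the four sequential list-membership branches (rebuilding two range comprehensions per call) by a sorted table of disjoint room intervals searched with a hand-written binary search plus an upper-bound check.
import Mathlib
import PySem

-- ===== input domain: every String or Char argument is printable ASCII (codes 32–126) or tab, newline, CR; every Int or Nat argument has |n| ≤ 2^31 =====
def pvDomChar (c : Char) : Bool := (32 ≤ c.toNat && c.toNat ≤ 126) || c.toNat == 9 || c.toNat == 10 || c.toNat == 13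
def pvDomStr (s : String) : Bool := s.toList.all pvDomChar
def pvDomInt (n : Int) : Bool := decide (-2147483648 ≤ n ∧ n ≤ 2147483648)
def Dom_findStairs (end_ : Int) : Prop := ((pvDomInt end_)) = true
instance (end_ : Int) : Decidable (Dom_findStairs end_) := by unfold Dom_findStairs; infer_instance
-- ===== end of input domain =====

-- B replaces A's four membership-branch tests by a sorted table of
-- disjoint room intervals classified with a binary search (objective: alternative).

-- ===== PORT A =====
def findStairs (end_ : Int) : String :=
  if ([114, 115, 116, 238, 239, 360, 365] : List Int).contains end_ then "A"
  else if (PySem.List.pyRange 117 126 1).contains end_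
          || ([241, 242, 243, 244, 245, 246, 247, 248, 249, 251] : List Int).contains end_
          || ([362, 364, 366, 367, 368, 369, 371, 373, 375, 377] : List Int).contains end_ then "B"
  else if (PySem.List.pyRange 126 134 1).contains end_
          || ([250, 252, 253, 254, 255, 256, 257, 259, 261] : List Int).contains end_
          || ([370, 372, 374, 376, 379, 381, 382, 383, 385, 387] : List Int).contains end_ then "C"
  else if ([134, 135, 136, 137, 258, 263, 378, 389] : List Int).contains end_ then "D"
  else "unknown"

-- ===== PORT B =====
-- the module-level sorted interval table of Source B
def pvIntervals : List (Int × Int × String) :=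
  [(114, 116, "A"), (117, 125, "B"), (126, 133, "C"), (134, 137, "D"),
   (238, 239, "A"), (241, 249, "B"), (250, 250, "C"), (251, 251, "B"),
   (252, 257, "C"), (258, 258, "D"), (259, 259, "C"), (261, 261, "C"),
   (263, 263, "D"), (360, 360, "A"), (362, 362, "B"), (364, 364, "B"),
   (365, 365, "A"), (366, 369, "B"), (370, 370, "C"), (371, 371, "B"),
   (372, 372, "C"), (373, 373, "B"), (374, 374, "C"), (375, 375, "B"),
   (376, 376, "C"), (377, 377, "B"), (378, 378, "D"), (379, 379, "C"),
   (381, 383, "C"), (385, 385, "C"), (387, 387, "C"), (389, 389, "D")]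

-- Source B's while-loop: binary search for the number of intervals whose start is ≤ end_
-- (fuel is only the totality device; fuel = hi - lo suffices, the call passes the list length)
def pvBSearch (end_ : Int) : Nat → Nat → Nat → Nat
  | 0, lo, _ => lo
  | fuel + 1, lo, hi =>
    if lo < hi then
      let mid := (lo + hi) / 2
      if (pvIntervals.getD mid (0, 0, "")).1 ≤ end_ then
        pvBSearch end_ fuel (mid + 1) hi
      else
        pvBSearch end_ fuel lo mid
    else lo

def findStairs_alt (end_ : Int) : String :=
  let lo := pvBSearch end_ pvIntervals.length 0 pvIntervals.length
  if lo = 0 then "unknown"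
  else
    let t := pvIntervals.getD (lo - 1) (0, 0, "")
    if end_ ≤ t.2.1 then t.2.2 else "unknown"

-- ===== PRECONDITION & SPEC =====
def Spec_findStairs (end_ : Int) (out : String) : Prop := out = findStairs_alt end_
instance (end_ : Int) (out : String) : Decidable (Spec_findStairs end_ out) := by unfold Spec_findStairs; infer_instance

-- ===== CLAIM =====
def Claim_equal_findStairs : Prop := ∀ (end_ : Int), Dom_findStairs end_ → Spec_findStairs end_ (findStairs end_)

-- ===== LEMMAS AND PROOFS =====

-- all interval starts lie in [114, 389]
lemma starts_bounded : ∀ i ∈ List.range pvIntervals.length,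
    114 ≤ (pvIntervals.getD i (0, 0, "")).1 ∧ (pvIntervals.getD i (0, 0, "")).1 ≤ 389 := by
  decide

-- if end_ is below every start in range, the search returns lo (any fuel)
lemma bsearch_all_gt (end_ : Int) (hlow : end_ < 114) :
    ∀ n lo hi, hi ≤ pvIntervals.length → pvBSearch end_ n lo hi = lo := by
  intro n
  induction n with
  | zero => intro lo hi _; rfl
  | succ n ih =>
    intro lo hi hlen
    unfold pvBSearch
    by_cases hlt : lo < hi
    · have hmem : (lo + hi) / 2 ∈ List.range pvIntervals.length := by
        simp [List.mem_range]; omega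
      have hc : ¬ (pvIntervals.getD ((lo + hi) / 2) (0, 0, "")).1 ≤ end_ := by
        have := (starts_bounded _ hmem).1; omega
      simp only [hlt, if_true, hc, if_false]
      exact ih lo ((lo + hi) / 2) (by omega)
    · simp [hlt]

-- if end_ is at or above every start (incl. the default 0), the search returns hi
lemma bsearch_all_le (end_ : Int) (hhigh : 389 < end_) :
    ∀ n lo hi, hi - lo ≤ n → lo ≤ hi → pvBSearch end_ n lo hi = hi := by
  intro n
  induction n with
  | zero =>
    intro lo hi hle hlohi
    unfold pvBSearch
    omega
  | succ n ih =>
    intro lo hi hle hlohi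
    unfold pvBSearch
    by_cases hlt : lo < hi
    · have hc : (pvIntervals.getD ((lo + hi) / 2) (0, 0, "")).1 ≤ end_ := by
        by_cases hr : (lo + hi) / 2 < pvIntervals.length
        · have := (starts_bounded _ (by simp [List.mem_range]; omega)).2; omega
        · rw [List.getD_eq_default _ _ (by omega)]; norm_num; omega
      simp only [hlt, if_true, hc]
      exact ih ((lo + hi) / 2 + 1) hi (by omega) (by omega)
    · simp [hlt]; omega

-- agreement on the covered band, checked pointwise
set_option maxRecDepth 8000 in
lemma agree_inrange : ∀ k ∈ List.range 276, findStairs (114 + k) = findStairs_alt (114 + k) := by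
  decide

lemma a_out (end_ : Int) (h : end_ < 114 ∨ 389 < end_) : findStairs end_ = "unknown" := by
  have hr1 : PySem.List.pyRange 117 126 1 = [117, 118, 119, 120, 121, 122, 123, 124, 125] := by decide
  have hr2 : PySem.List.pyRange 126 134 1 = [126, 127, 128, 129, 130, 131, 132, 133] := by decide
  simp only [findStairs, hr1, hr2, List.contains_eq_mem, List.mem_cons, List.not_mem_nil,
    or_false, decide_eq_true_eq, Bool.or_eq_true]
  split_ifs with h1 h2 h3 h4 <;> first | rfl | omega

lemma b_out (end_ : Int) (h : end_ < 114 ∨ 389 < end_) : findStairs_alt end_ = "unknown" := by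
  rcases h with h | h
  · have hs : pvBSearch end_ pvIntervals.length 0 pvIntervals.length = 0 :=
      bsearch_all_gt end_ h pvIntervals.length 0 pvIntervals.length (le_refl _)
    simp [findStairs_alt, hs]
  · have hs : pvBSearch end_ pvIntervals.length 0 pvIntervals.length = pvIntervals.length :=
      bsearch_all_le end_ h pvIntervals.length 0 pvIntervals.length (by omega) (by omega)
    have hlen : pvIntervals.length = 32 := by decide
    simp only [findStairs_alt]
    rw [hs, hlen]
    norm_num [pvIntervals]
    omega

-- ===== VERDICT =====
theorem findStairs_spec : Claim_equal_findStairs := by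
  intro end_ _
  unfold Spec_findStairs
  by_cases h : 114 ≤ end_ ∧ end_ ≤ 389
  · have hk : end_ = 114 + ((end_ - 114).toNat : Int) := by omega
    rw [hk]
    exact agree_inrange (end_ - 114).toNat (by simp [List.mem_range]; omega)
  · rw [a_out end_ (by omega), b_out end_ (by omega)]
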